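-- pv_equiv track=rewrite | github.com/rajpalsh-gif/Spatial-world | stepgame/pipeline.py | _build_token_grid
-- ===== SOURCE A (Python) =====
-- from typing import List, Dict, Tuple, Optional, Any
--
-- def _bounds(coords: Dict[str, Tuple[int,int]]):
--     xs = [x for x,_ in coords.values()] or [0]
--     ys = [y for _,y in coords.values()] or [0]
--     return min(xs), max(xs), min(ys), max(ys)
--
-- def _build_token_grid(coords: Dict[str, Tuple[int,int]], keep: set = None):
--     if keep is not None:
--         coords = {s:xy for s,xy in coords.items() if s in keep}
--     if not coords:
--         return [[]], []
--     minx, maxx, miny, maxy = _bounds(coords)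
--     W = maxx - minx + 1; H = maxy - miny + 1
--     cell: Dict[Tuple[int,int], List[str]] = {}
--     for sym,(x,y) in coords.items():
--         cell.setdefault((x,y), []).append(sym)
--     for k in cell: cell[k].sort()
--     grid = []
--     for y in range(maxy, miny-1, -1):
--         row = []
--         for x in range(minx, maxx+1):
--             toks = cell.get((x,y), [])
--             row.append("/".join(toks) if toks else "_")
--         grid.append(row)
--     kept = sorted(coords.keys())
--     return grid, kept
-- ===== SOURCE B (Python) =====
-- def _build_token_grid(coords, keep=None):
--     items = [(s, xy) for s, xy in coords.items() if keep is None or s in keep]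
--     if not items:
--         return [[]], []
--     items.sort(key=lambda p: p[0])
--     xs = [x for _, (x, _) in items]
--     ys = [y for _, (_, y) in items]
--     minx, maxx, miny, maxy = min(xs), max(xs), min(ys), max(ys)
--     W = maxx - minx + 1
--     H = maxy - miny + 1
--     acc = [[None] * W for _ in range(H)]
--     for s, (x, y) in items:
--         r, c = maxy - y, x - minx
--         acc[r][c] = s if acc[r][c] is None else acc[r][c] + "/" + s
--     grid = [[t if t is not None else "_" for t in row] for row in acc]
--     kept = [s for s, _ in items]
--     return grid, kept
-- ===== Notes on version B (the rewrite author's own statement) =====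
-- stated objective: alternative
-- what changed: B drops A's per-coordinate bucket dict (setdefault/append gather, per-bucket sort, then an H*W render loop of dict lookups): it sorts the kept items once by symbol, scatters them in one pass into an Option-valued grid by concatenating '/'-joined strings incrementally (stable sort makes each cell's string already ordered), and reads kept directly off the sorted items instead of re-sorting the keys.
import Mathlib
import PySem

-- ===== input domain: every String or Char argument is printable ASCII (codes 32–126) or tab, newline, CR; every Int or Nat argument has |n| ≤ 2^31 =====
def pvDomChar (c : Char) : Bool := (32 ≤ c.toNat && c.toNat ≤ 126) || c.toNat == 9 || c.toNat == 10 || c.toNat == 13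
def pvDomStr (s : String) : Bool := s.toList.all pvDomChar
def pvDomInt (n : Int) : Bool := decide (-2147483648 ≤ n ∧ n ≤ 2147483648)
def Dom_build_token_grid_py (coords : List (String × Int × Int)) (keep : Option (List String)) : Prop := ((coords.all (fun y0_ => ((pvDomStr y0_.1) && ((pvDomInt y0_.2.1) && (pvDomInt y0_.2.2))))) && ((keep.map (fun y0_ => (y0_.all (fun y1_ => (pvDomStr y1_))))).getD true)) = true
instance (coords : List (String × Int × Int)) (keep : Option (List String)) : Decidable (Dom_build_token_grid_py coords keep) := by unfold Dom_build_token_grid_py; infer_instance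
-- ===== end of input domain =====

-- B drops A's per-coordinate bucket dict: it sorts the kept items once by symbol and scatters them
-- in one pass into an Option-String grid, concatenating each cell's '/'-joined string incrementally
-- (alternative decomposition, not claimed faster).

-- ===== PORT A =====
-- port of _bounds (Python's min/max on these lists is total: the 'or [0]' guarantees nonemptiness,
-- so min?/max? with .getD 0 is exact)
def bounds_py (d : PySem.Dict String (Int × Int)) : Int × Int × Int × Int :=
  let xs := d.values.map (·.1)
  let xs := if xs = [] then [0] else xs
  let ys := d.values.map (·.2)
  let ys := if ys = [] then [0] else ys
  ((PySem.List.min? xs (fun v => v)).getD 0, (PySem.List.max? xs (fun v => v)).getD 0,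
   (PySem.List.min? ys (fun v => v)).getD 0, (PySem.List.max? ys (fun v => v)).getD 0)

def build_token_grid_py (coords : List (String × Int × Int)) (keep : Option (List String)) : List (List String) × List String :=
  -- the dict parameter (built from the pairs; duplicate keys overwrite in place, Python dict rule)
  let d0 := PySem.Dict.ofList coords
  -- 'coords = {s:xy for s,xy in coords.items() if s in keep}'
  let d := match keep with
    | none => d0
    | some ks => PySem.Dict.mk (d0.items.filter (fun p => ks.contains p.1))
  if d.items = [] then ([[]], []) else
  let b := bounds_py d
  let minx := b.1; let maxx := b.2.1; let miny := b.2.2.1; let maxy := b.2.2.2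
  let _W := maxx - minx + 1
  let _H := maxy - miny + 1
  -- 'cell.setdefault((x,y), []).append(sym)' = in-place append to the entry, default []
  let cell := d.items.foldl (fun c p => c.modify p.2 [] (fun t => t ++ [p.1])) PySem.Dict.empty
  -- 'for k in cell: cell[k].sort()' = sort every value in place
  let cell := PySem.Dict.mk (cell.items.map (fun p => (p.1, PySem.List.sorted p.2 (fun s => s) false)))
  let grid := (PySem.List.pyRange maxy (miny - 1) (-1)).foldl (fun g y =>
      g ++ [(PySem.List.pyRange minx (maxx + 1) 1).foldl (fun row x =>
        row ++ [if cell.getD (x, y) [] = [] then "_" else PySem.Str.join "/" (cell.getD (x, y) [])]) []]) []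
  let kept := PySem.List.sorted d.keys (fun s => s) false
  (grid, kept)

-- ===== PORT B =====
def build_token_grid_py_alt (coords : List (String × Int × Int)) (keep : Option (List String)) : List (List String) × List String :=
  let d0 := PySem.Dict.ofList coords
  -- 'items = [(s, xy) for s, xy in coords.items() if keep is None or s in keep]'
  let items0 := match keep with
    | none => d0.items
    | some ks => d0.items.filter (fun p => ks.contains p.1)
  if items0 = [] then ([[]], []) else
  -- 'items.sort(key=lambda p: p[0])'
  let items := PySem.List.sorted items0 (fun p => p.1) false
  let xs := items.map (fun p => p.2.1)
  let ys := items.map (fun p => p.2.2)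
  -- min/max on nonempty lists
  let minx := (PySem.List.min? xs (fun v => v)).getD 0
  let maxx := (PySem.List.max? xs (fun v => v)).getD 0
  let miny := (PySem.List.min? ys (fun v => v)).getD 0
  let maxy := (PySem.List.max? ys (fun v => v)).getD 0
  let W := maxx - minx + 1
  let H := maxy - miny + 1
  -- acc = [[None] * W for _ in range(H)]
  let acc0 := (PySem.List.pyRange 0 H 1).map (fun _ => (PySem.List.pyRange 0 W 1).map (fun _ => (none : Option String)))
  -- one scatter pass: 'acc[r][c] = s if acc[r][c] is None else acc[r][c] + "/" + s' (in-place, modelled by get/set)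
  let acc := items.foldl (fun g p =>
      PySem.List.pySetD g (maxy - p.2.2)
        (PySem.List.pySetD (PySem.List.pyGetD g (maxy - p.2.2) []) (p.2.1 - minx)
          (some (match PySem.List.pyGetD (PySem.List.pyGetD g (maxy - p.2.2) []) (p.2.1 - minx) none with
                 | none => p.1
                 | some t => t ++ "/" ++ p.1)))) acc0
  -- grid = [[t if t is not None else "_" for t in row] for row in acc]
  let grid := acc.map (fun row => row.map (fun t => t.getD "_"))
  -- kept = [s for s, _ in items]
  let kept := items.map (fun p => p.1)
  (grid, kept)

-- ===== PRECONDITION & SPEC =====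
def Spec_build_token_grid_py (coords : List (String × Int × Int)) (keep : Option (List String)) (out : List (List String) × List String) : Prop := out = build_token_grid_py_alt coords keep
instance (coords : List (String × Int × Int)) (keep : Option (List String)) (out : List (List String) × List String) : Decidable (Spec_build_token_grid_py coords keep out) := by unfold Spec_build_token_grid_py; infer_instance

-- ===== CLAIM (what is proved, stated in full; the proofs are below) =====
def Claim_equal_build_token_grid_py : Prop := ∀ (coords : List (String × Int × Int)) (keep : Option (List String)), Dom_build_token_grid_py coords keep → Spec_build_token_grid_py coords keep (build_token_grid_py coords keep)

-- ===== LEMMAS AND PROOFS =====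

-- B's per-cell accumulation step ('s if cur is None else cur + "/" + s')
def pvCombine (o : Option String) (s : String) : Option String :=
  some (match o with | none => s | some t => t ++ "/" ++ s)

def pvScatterStep (maxy minx : Int) (g : List (List (Option String))) (p : String × Int × Int) : List (List (Option String)) :=
  PySem.List.pySetD g (maxy - p.2.2)
    (PySem.List.pySetD (PySem.List.pyGetD g (maxy - p.2.2) []) (p.2.1 - minx)
      (pvCombine (PySem.List.pyGetD (PySem.List.pyGetD g (maxy - p.2.2) []) (p.2.1 - minx) none) p.1))

-- min/max over Int values only depend on the multiset
theorem pv_min_perm (l l' : List Int) (h : l.Perm l') :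
    PySem.List.min? l (fun v => v) = PySem.List.min? l' (fun v => v) := by
  rcases h1 : PySem.List.min? l (fun v => v) with _ | m
  · rw [PySem.List.min?_eq_none_iff] at h1
    subst h1
    rw [List.nil_perm] at h
    subst h
    rfl
  · rcases h2 : PySem.List.min? l' (fun v => v) with _ | m'
    · rw [PySem.List.min?_eq_none_iff] at h2
      subst h2
      rw [List.perm_nil] at h
      rw [h] at h1
      simp [PySem.List.min?] at h1
    · have hm : m ∈ l := PySem.List.min?_mem h1
      have hm' : m' ∈ l' := PySem.List.min?_mem h2
      have h3 := PySem.List.min?_isMin h1 m' (h.symm.mem_iff.mp hm')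
      have h4 := PySem.List.min?_isMin h2 m (h.mem_iff.mp hm)
      have : m = m' := le_antisymm h3 h4
      rw [this]

theorem pv_max_perm (l l' : List Int) (h : l.Perm l') :
    PySem.List.max? l (fun v => v) = PySem.List.max? l' (fun v => v) := by
  rcases h1 : PySem.List.max? l (fun v => v) with _ | m
  · rw [PySem.List.max?_eq_none_iff] at h1
    subst h1
    rw [List.nil_perm] at h
    subst h
    rfl
  · rcases h2 : PySem.List.max? l' (fun v => v) with _ | m'
    · rw [PySem.List.max?_eq_none_iff] at h2
      subst h2
      rw [List.perm_nil] at h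
      rw [h] at h1
      simp [PySem.List.max?] at h1
    · have hm : m ∈ l := PySem.List.max?_mem h1
      have hm' : m' ∈ l' := PySem.List.max?_mem h2
      have h3 := PySem.List.max?_isMax h1 m' (h.symm.mem_iff.mp hm')
      have h4 := PySem.List.max?_isMax h2 m (h.mem_iff.mp hm)
      have : m' = m := le_antisymm h3 h4
      rw [this]

theorem pv_get?_mk_map {κ ν μ : Type} [BEq κ] (its : List (κ × ν)) (f : ν → μ) (k : κ) :
    (PySem.Dict.mk (its.map (fun p => (p.1, f p.2)))).get? k = ((PySem.Dict.mk its).get? k).map f := by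
  induction its with
  | nil => rfl
  | cons p rest ih =>
      obtain ⟨k', v⟩ := p
      simp only [List.map_cons, PySem.Dict.get?_mk_cons]
      split <;> simp [ih]

-- the content of A's gather dict at a key is the filter of the items at that coordinate
theorem pv_cell_getD (items : List (String × Int × Int)) (key : Int × Int) :
    (items.foldl (fun c p => c.modify p.2 [] (fun t => t ++ [p.1])) PySem.Dict.empty).getD key []
      = (items.filter (fun p => p.2 == key)).map (·.1) := by
  have h1 : items.foldl (fun c p => c.modify p.2 [] (fun t => t ++ [p.1])) PySem.Dict.empty
      = (items.map (fun p => (p.2, p.1))).foldl (fun c q => c.modify q.1 [] (fun t => t ++ [q.2])) PySem.Dict.empty := by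
    rw [List.foldl_map]
  rw [h1, PySem.Dict.getD_foldl_modify_append, List.filter_map, List.map_map]
  simp [Function.comp_def]

-- getD on a dict whose values were all sorted in place
theorem pv_getD_mk_sorted {κ : Type} [BEq κ] (its : List (κ × List String)) (k : κ) :
    (PySem.Dict.mk (its.map (fun p => (p.1, PySem.List.sorted p.2 (fun s => s) false)))).getD k []
      = PySem.List.sorted ((PySem.Dict.mk its).getD k []) (fun s => s) false := by
  rw [PySem.Dict.getD_eq_get?_getD, PySem.Dict.getD_eq_get?_getD,
    pv_get?_mk_map its (fun v => PySem.List.sorted v (fun s => s) false) k]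
  cases (PySem.Dict.mk its).get? k <;> rfl

-- gluing one more '/'-separated piece onto the head of a join
theorem pv_join_glue (sep a b : List Char) (rest : List (List Char)) :
    PySem.Chars.join sep ((a ++ sep ++ b) :: rest) = PySem.Chars.join sep (a :: b :: rest) := by
  cases rest with
  | nil => rw [PySem.Chars.join_singleton, PySem.Chars.join_cons_cons, PySem.Chars.join_singleton]
  | cons u t =>
      simp [PySem.Chars.join_cons_cons, List.append_assoc]

theorem pv_join_eq_of_toList (s t : String) (h : s.toList = t.toList) : s = t :=
  String.toList_inj.mp h

-- B's running string accumulation over a cell's token list IS "/".join of that list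
theorem pv_foldl_combine (l : List String) (t : String) :
    l.foldl pvCombine (some t) = some (PySem.Str.join "/" (t :: l)) := by
  induction l generalizing t with
  | nil =>
      refine congrArg some (pv_join_eq_of_toList _ _ ?_).symm
      rw [PySem.Str.toList_join, List.map_cons, List.map_nil, PySem.Chars.join_singleton]
  | cons s l ih =>
      rw [List.foldl_cons]
      have hstep : pvCombine (some t) s = some (t ++ "/" ++ s) := rfl
      rw [hstep, ih]
      refine congrArg some (pv_join_eq_of_toList _ _ ?_)
      rw [PySem.Str.toList_join, PySem.Str.toList_join, List.map_cons, List.map_cons, List.map_cons]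
      rw [String.toList_append, String.toList_append]
      exact pv_join_glue _ _ _ _

-- a key-ordered list whose keys are a permutation of l IS sorted(l)
theorem pv_map_fst_sorted (z : List (String × Int × Int)) (l : List String)
    (hperm : (z.map (fun p => p.1)).Perm l)
    (hpw : z.Pairwise (fun a b => a.1 ≤ b.1)) :
    z.map (fun p => p.1) = PySem.List.sorted l (fun s => s) false := by
  refine PySem.List.eq_of_perm_of_pairwise_le_of_injective (fun s => s) (fun _ _ h => h)
    (hperm.trans (PySem.List.sorted_perm l (fun s => s) false).symm) ?_ ?_
  · exact hpw.map _ (fun a b h => h)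
  · exact PySem.List.sorted_pairwise l (fun s => s)

-- B's scatter pass: shape is preserved and each cell accumulates exactly its coordinate's symbols
theorem pv_scatter (maxy minx : Int) (Hn Wn : Nat) (items : List (String × Int × Int))
    (g0 : List (List (Option String)))
    (hH : g0.length = Hn) (hW : ∀ row ∈ g0, row.length = Wn)
    (hb : ∀ p ∈ items, 0 ≤ maxy - p.2.2 ∧ (maxy - p.2.2).toNat < Hn ∧ 0 ≤ p.2.1 - minx ∧ (p.2.1 - minx).toNat < Wn) :
    (items.foldl (pvScatterStep maxy minx) g0).length = Hn ∧
    (∀ row ∈ items.foldl (pvScatterStep maxy minx) g0, row.length = Wn) ∧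
    (∀ rn cn : Nat, rn < Hn → cn < Wn →
      PySem.List.pyGetD (PySem.List.pyGetD (items.foldl (pvScatterStep maxy minx) g0) (rn : Int) []) (cn : Int) none
        = ((items.filter (fun p => (maxy - p.2.2 == (rn : Int)) && (p.2.1 - minx == (cn : Int)))).map (·.1)).foldl
            pvCombine (PySem.List.pyGetD (PySem.List.pyGetD g0 (rn : Int) []) (cn : Int) none)) := by
  induction items generalizing g0 with
  | nil => exact ⟨hH, hW, fun rn cn _ _ => by simp⟩
  | cons p rest ih =>
      obtain ⟨hr0, hrHn, hc0, hcWn⟩ := hb p (List.mem_cons_self ..)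
      obtain ⟨rnat, hrcast⟩ : ∃ n : Nat, maxy - p.2.2 = (n : Int) := ⟨_, (Int.toNat_of_nonneg hr0).symm⟩
      obtain ⟨cnat, hccast⟩ : ∃ n : Nat, p.2.1 - minx = (n : Int) := ⟨_, (Int.toNat_of_nonneg hc0).symm⟩
      have hrH : rnat < Hn := by omega
      have hcW : cnat < Wn := by omega
      have hrlen : rnat < g0.length := by rw [hH]; exact hrH
      have hrow0 : PySem.List.pyGetD g0 (maxy - p.2.2) [] = g0.getD rnat [] := by
        rw [hrcast, PySem.List.pyGetD_natCast]
      have hrowmem : g0.getD rnat [] ∈ g0 := by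
        rw [List.getD_eq_getElem _ _ hrlen]; exact List.getElem_mem hrlen
      have hrowlen : (g0.getD rnat []).length = Wn := hW _ hrowmem
      have hclen : cnat < (g0.getD rnat []).length := by rw [hrowlen]; exact hcW
      have hg1 : pvScatterStep maxy minx g0 p
          = PySem.List.pySetD g0 ((rnat : Nat) : Int)
              (PySem.List.pySetD (g0.getD rnat []) ((cnat : Nat) : Int)
                (pvCombine (PySem.List.pyGetD (g0.getD rnat []) ((cnat : Nat) : Int) none) p.1)) := by
        rw [pvScatterStep, hrow0, hrcast, hccast]
      have hnewlen : (PySem.List.pySetD (g0.getD rnat []) ((cnat : Nat) : Int)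
          (pvCombine (PySem.List.pyGetD (g0.getD rnat []) ((cnat : Nat) : Int) none) p.1)).length = Wn := by
        rw [PySem.List.length_pySetD, hrowlen]
      have hg1H : (pvScatterStep maxy minx g0 p).length = Hn := by
        rw [hg1, PySem.List.length_pySetD, hH]
      have hg1W : ∀ row ∈ pvScatterStep maxy minx g0 p, row.length = Wn := by
        intro row hmem
        rw [hg1, PySem.List.pySetD_of_nonneg _ _ (by positivity)] at hmem
        rcases List.mem_or_eq_of_mem_set hmem with h | h
        · exact hW _ h
        · rw [h]; exact hnewlen
      obtain ⟨ihH, ihW, ihC⟩ := ih (pvScatterStep maxy minx g0 p) hg1H hg1W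
        (fun q hq => hb q (List.mem_cons_of_mem _ hq))
      refine ⟨by simpa using ihH, by simpa using ihW, ?_⟩
      intro rn cn hrn hcn
      have key : PySem.List.pyGetD (PySem.List.pyGetD (pvScatterStep maxy minx g0 p) (rn : Int) []) (cn : Int) none
          = if (maxy - p.2.2 == (rn : Int)) && (p.2.1 - minx == (cn : Int))
            then pvCombine (PySem.List.pyGetD (PySem.List.pyGetD g0 (rn : Int) []) (cn : Int) none) p.1
            else PySem.List.pyGetD (PySem.List.pyGetD g0 (rn : Int) []) (cn : Int) none := by
        rw [hg1, hrcast, hccast, PySem.List.pyGetD_pySetD_natCast _ _ _ _ _ hrlen]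
        by_cases hre : rn = rnat
        · subst hre
          rw [if_pos rfl, PySem.List.pyGetD_pySetD_natCast _ _ _ _ _ hclen]
          by_cases hce : cn = cnat
          · subst hce
            rw [if_pos rfl]
            have hb1 : (((rn : Nat) : Int) == ((rn : Nat) : Int)) = true := by simp
            have hb2 : (((cn : Nat) : Int) == ((cn : Nat) : Int)) = true := by simp
            rw [hb1, hb2]
            rw [PySem.List.pyGetD_natCast g0 rn]
            simp
          · rw [if_neg hce]
            have hb2 : (((cnat : Nat) : Int) == ((cn : Nat) : Int)) = false := by
              rw [beq_eq_false_iff_ne]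
              intro h
              exact hce (by exact_mod_cast h.symm)
            rw [hb2]
            simp only [Bool.and_false, Bool.false_eq_true, if_false]
            rw [PySem.List.pyGetD_natCast g0 rn]
        · rw [if_neg hre]
          have hb1 : (((rnat : Nat) : Int) == ((rn : Nat) : Int)) = false := by
            rw [beq_eq_false_iff_ne]
            intro h
            exact hre (by exact_mod_cast h.symm)
          rw [hb1]
          simp
      rw [List.foldl_cons, ihC rn cn hrn hcn, key, List.filter_cons]
      by_cases hcond : (maxy - p.2.2 == (rn : Int) && p.2.1 - minx == (cn : Int)) = true
      · simp [hcond]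
      · rw [Bool.not_eq_true] at hcond
        simp [hcond]

-- the grids agree: A's per-cell dict gather + render equals B's sorted scatter with string accumulation
theorem pv_grid (items0 : List (String × Int × Int)) (minx maxx miny maxy : Int)
    (hx : ∀ p ∈ items0, minx ≤ p.2.1 ∧ p.2.1 ≤ maxx)
    (hy : ∀ p ∈ items0, miny ≤ p.2.2 ∧ p.2.2 ≤ maxy)
    (hxm : minx ≤ maxx) (hym : miny ≤ maxy) :
    (PySem.List.pyRange maxy (miny - 1) (-1)).foldl (fun g y =>
        g ++ [(PySem.List.pyRange minx (maxx + 1) 1).foldl (fun row x =>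
          row ++ [if (PySem.Dict.mk ((items0.foldl (fun c p => c.modify p.2 [] (fun t => t ++ [p.1])) PySem.Dict.empty).items.map (fun p => (p.1, PySem.List.sorted p.2 (fun s => s) false)))).getD (x, y) [] = [] then "_"
                  else PySem.Str.join "/" ((PySem.Dict.mk ((items0.foldl (fun c p => c.modify p.2 [] (fun t => t ++ [p.1])) PySem.Dict.empty).items.map (fun p => (p.1, PySem.List.sorted p.2 (fun s => s) false)))).getD (x, y) [])]) []]) []
    = ((PySem.List.sorted items0 (fun p => p.1) false).foldl (pvScatterStep maxy minx)
        ((PySem.List.pyRange 0 (maxy - miny + 1) 1).map (fun _ => (PySem.List.pyRange 0 (maxx - minx + 1) 1).map (fun _ => (none : Option String))))).map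
        (fun row => row.map (fun t => t.getD "_")) := by
  have hcell : ∀ k : Int × Int,
      (PySem.Dict.mk ((items0.foldl (fun c p => c.modify p.2 [] (fun t => t ++ [p.1])) PySem.Dict.empty).items.map (fun p => (p.1, PySem.List.sorted p.2 (fun s => s) false)))).getD k []
        = PySem.List.sorted ((items0.filter (fun p => p.2 == k)).map (fun p => p.1)) (fun s => s) false := by
    intro k
    rw [pv_getD_mk_sorted]
    exact congrArg (fun l => PySem.List.sorted l (fun s => s) false) (pv_cell_getD items0 k)
  set s := PySem.List.sorted items0 (fun p => p.1) false with hs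
  have hsperm : s.Perm items0 := PySem.List.sorted_perm items0 (fun p => p.1) false
  set Hn := (maxy - miny + 1).toNat with hHn
  set Wn := (maxx - minx + 1).toNat with hWn
  have hg0len : ((PySem.List.pyRange 0 (maxy - miny + 1) 1).map (fun _ => (PySem.List.pyRange 0 (maxx - minx + 1) 1).map (fun _ => (none : Option String)))).length = Hn := by
    simp [PySem.List.length_pyRange_one]
    omega
  have hg0W : ∀ row ∈ ((PySem.List.pyRange 0 (maxy - miny + 1) 1).map (fun _ => (PySem.List.pyRange 0 (maxx - minx + 1) 1).map (fun _ => (none : Option String)))), row.length = Wn := by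
    intro row hrow
    rw [List.mem_map] at hrow
    obtain ⟨-, -, rfl⟩ := hrow
    simp [PySem.List.length_pyRange_one]
    omega
  have hbnds : ∀ p ∈ s, 0 ≤ maxy - p.2.2 ∧ (maxy - p.2.2).toNat < Hn ∧ 0 ≤ p.2.1 - minx ∧ (p.2.1 - minx).toNat < Wn := by
    intro p hp
    have hp0 : p ∈ items0 := hsperm.mem_iff.mp hp
    obtain ⟨h1, h2⟩ := hx p hp0
    obtain ⟨h3, h4⟩ := hy p hp0
    omega
  obtain ⟨hglen, hgW, hgC⟩ := pv_scatter maxy minx Hn Wn s ((PySem.List.pyRange 0 (maxy - miny + 1) 1).map (fun _ => (PySem.List.pyRange 0 (maxx - minx + 1) 1).map (fun _ => (none : Option String)))) hg0len hg0W hbnds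
  set g := s.foldl (pvScatterStep maxy minx) ((PySem.List.pyRange 0 (maxy - miny + 1) 1).map (fun _ => (PySem.List.pyRange 0 (maxx - minx + 1) 1).map (fun _ => (none : Option String)))) with hg
  -- rewrite A's nested append-folds as nested maps
  simp only [PySem.List.foldl_append_singleton_eq_map, List.nil_append]
  -- compare element by element
  apply List.ext_getElem
  · simp [PySem.List.pyRange_neg_one, hglen, hHn]
    omega
  intro rn h1 h2
  have hrn : rn < Hn := by
    rw [List.length_map, hglen] at h2
    exact h2
  have hrg : rn < g.length := by rw [hglen]; exact hrn
  have hWrow : ∀ (h : rn < g.length), (g[rn]'h).length = Wn := fun h => hgW _ (List.getElem_mem h)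
  -- outer index: row rn corresponds to y = maxy - rn
  rw [List.getElem_map, List.getElem_map]
  have hyv : ∀ (h : rn < (PySem.List.pyRange maxy (miny - 1) (-1)).length),
      (PySem.List.pyRange maxy (miny - 1) (-1))[rn]'h = maxy - rn := by
    intro h
    simp [PySem.List.pyRange_neg_one]
  simp only [hyv]
  apply List.ext_getElem
  · simp only [List.length_map, PySem.List.length_pyRange_one, hWrow]
    omega
  intro cn h3 h4
  have hcn : cn < Wn := by
    simp only [List.length_map, hWrow] at h4
    exact h4
  rw [List.getElem_map, List.getElem_map]
  simp only [PySem.List.getElem_pyRange_one]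
  -- B's cell content from the scatter lemma
  have hcellB : ∀ (h : rn < g.length) (h' : cn < (g[rn]'h).length),
      (g[rn]'h)[cn]'h' = (((s.filter (fun p => p.2 == ((minx + (cn : Int)), (maxy - (rn : Int))))).map (fun p => p.1)).foldl pvCombine none) := by
    intro h h'
    have h0 : PySem.List.pyGetD (PySem.List.pyGetD ((PySem.List.pyRange 0 (maxy - miny + 1) 1).map (fun _ => (PySem.List.pyRange 0 (maxx - minx + 1) 1).map (fun _ => (none : Option String)))) (rn : Int) []) (cn : Int) none = none := by
      rw [PySem.List.pyGetD_natCast ((PySem.List.pyRange 0 (maxy - miny + 1) 1).map (fun _ => (PySem.List.pyRange 0 (maxx - minx + 1) 1).map (fun _ => (none : Option String)))) rn, List.getD_eq_getElem _ _ (by rw [hg0len]; exact hrn)]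
      rw [List.getElem_map]
      rw [PySem.List.pyGetD_natCast _ cn, List.getD_eq_getElem _ _ (by simp only [List.length_map, PySem.List.length_pyRange_one]; omega)]
      simp
    have hc := hgC rn cn hrn hcn
    rw [h0] at hc
    have hL : PySem.List.pyGetD (PySem.List.pyGetD g (rn : Int) []) (cn : Int) none = (g[rn]'h)[cn]'h' := by
      rw [PySem.List.pyGetD_natCast g rn, List.getD_eq_getElem _ _ h]
      rw [PySem.List.pyGetD_natCast _ cn, List.getD_eq_getElem _ _ h']
    rw [hL] at hc
    rw [hc]
    congr 2
    apply List.filter_congr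
    intro p _
    rw [Bool.eq_iff_iff, Bool.and_eq_true, beq_iff_eq, beq_iff_eq, beq_iff_eq, Prod.ext_iff]
    constructor
    · rintro ⟨e1, e2⟩
      constructor
      · show p.2.1 = minx + (cn : Int); omega
      · show p.2.2 = maxy - (rn : Int); omega
    · rintro ⟨e1, e2⟩
      have e1' : p.2.1 = minx + (cn : Int) := e1
      have e2' : p.2.2 = maxy - (rn : Int) := e2
      constructor <;> omega
  simp only [hcellB]
  rw [hcell ((minx + (cn : Int)), (maxy - (rn : Int)))]
  -- the tokens B visits at this cell, in order, ARE A's per-cell sorted token list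
  have hLs : ((s.filter (fun p => p.2 == ((minx + (cn : Int)), (maxy - (rn : Int))))).map (fun p => p.1))
      = PySem.List.sorted ((items0.filter (fun p => p.2 == ((minx + (cn : Int)), (maxy - (rn : Int))))).map (fun p => p.1)) (fun s => s) false := by
    apply pv_map_fst_sorted
    · exact (hsperm.filter _).map _
    · exact (PySem.List.sorted_pairwise items0 (fun p => p.1)).filter _
  rw [hLs]
  cases hT : PySem.List.sorted ((items0.filter (fun p => p.2 == ((minx + (cn : Int)), (maxy - (rn : Int))))).map (fun p => p.1)) (fun s => s) false with
  | nil => rfl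
  | cons t l =>
      rw [if_neg (by simp), List.foldl_cons]
      have : pvCombine none t = some t := rfl
      rw [this, pv_foldl_combine]
      rfl

-- A's whole body equals B's whole body, for the (already keep-filtered) dict
theorem pv_main (d : PySem.Dict String (Int × Int)) :
    (if d.items = [] then (([[]], []) : List (List String) × List String) else
  let b := bounds_py d
  let minx := b.1; let maxx := b.2.1; let miny := b.2.2.1; let maxy := b.2.2.2
  let _W := maxx - minx + 1
  let _H := maxy - miny + 1
  let cell := d.items.foldl (fun c p => c.modify p.2 [] (fun t => t ++ [p.1])) PySem.Dict.empty
  let cell := PySem.Dict.mk (cell.items.map (fun p => (p.1, PySem.List.sorted p.2 (fun s => s) false)))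
  let grid := (PySem.List.pyRange maxy (miny - 1) (-1)).foldl (fun g y =>
      g ++ [(PySem.List.pyRange minx (maxx + 1) 1).foldl (fun row x =>
        row ++ [if cell.getD (x, y) [] = [] then "_" else PySem.Str.join "/" (cell.getD (x, y) [])]) []]) []
  let kept := PySem.List.sorted d.keys (fun s => s) false
  (grid, kept))
    =
    (if d.items = [] then (([[]], []) : List (List String) × List String) else
  let items := PySem.List.sorted d.items (fun p => p.1) false
  let xs := items.map (fun p => p.2.1)
  let ys := items.map (fun p => p.2.2)
  let minx := (PySem.List.min? xs (fun v => v)).getD 0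
  let maxx := (PySem.List.max? xs (fun v => v)).getD 0
  let miny := (PySem.List.min? ys (fun v => v)).getD 0
  let maxy := (PySem.List.max? ys (fun v => v)).getD 0
  let W := maxx - minx + 1
  let H := maxy - miny + 1
  let acc0 := (PySem.List.pyRange 0 H 1).map (fun _ => (PySem.List.pyRange 0 W 1).map (fun _ => (none : Option String)))
  let acc := items.foldl (fun g p =>
      PySem.List.pySetD g (maxy - p.2.2)
        (PySem.List.pySetD (PySem.List.pyGetD g (maxy - p.2.2) []) (p.2.1 - minx)
          (some (match PySem.List.pyGetD (PySem.List.pyGetD g (maxy - p.2.2) []) (p.2.1 - minx) none with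
                 | none => p.1
                 | some t => t ++ "/" ++ p.1)))) acc0
  let grid := acc.map (fun row => row.map (fun t => t.getD "_"))
  let kept := items.map (fun p => p.1)
  (grid, kept)) := by
  by_cases hne : d.items = []
  · rw [if_pos hne, if_pos hne]
  · rw [if_neg hne, if_neg hne]
    have hsperm : (PySem.List.sorted d.items (fun p => p.1) false).Perm d.items :=
      PySem.List.sorted_perm d.items (fun p => p.1) false
    -- B's bounds over the sorted items equal A's bounds over the dict values
    have hxperm : ((PySem.List.sorted d.items (fun p => p.1) false).map (fun p => p.2.1)).Perm (d.values.map (fun q => q.1)) := by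
      have : d.values.map (fun q => q.1) = d.items.map (fun p => p.2.1) := by
        simp [PySem.Dict.values, List.map_map, Function.comp_def]
      rw [this]
      exact hsperm.map _
    have hyperm : ((PySem.List.sorted d.items (fun p => p.1) false).map (fun p => p.2.2)).Perm (d.values.map (fun q => q.2)) := by
      have : d.values.map (fun q => q.2) = d.items.map (fun p => p.2.2) := by
        simp [PySem.Dict.values, List.map_map, Function.comp_def]
      rw [this]
      exact hsperm.map _
    have hxs : d.values.map (fun q => q.1) ≠ [] := by
      simp [PySem.Dict.values, hne]
    have hys : d.values.map (fun q => q.2) ≠ [] := by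
      simp [PySem.Dict.values, hne]
    obtain ⟨mx, hmx⟩ : ∃ m, PySem.List.min? (d.values.map (fun q => q.1)) (fun v => v) = some m := by
      rcases h : PySem.List.min? (d.values.map (fun q => q.1)) (fun v => v) with _ | m
      · rw [PySem.List.min?_eq_none_iff] at h; exact absurd h hxs
      · exact ⟨m, h⟩
    obtain ⟨Mx, hMx⟩ : ∃ m, PySem.List.max? (d.values.map (fun q => q.1)) (fun v => v) = some m := by
      rcases h : PySem.List.max? (d.values.map (fun q => q.1)) (fun v => v) with _ | m
      · rw [PySem.List.max?_eq_none_iff] at h; exact absurd h hxs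
      · exact ⟨m, h⟩
    obtain ⟨my0, hmy⟩ : ∃ m, PySem.List.min? (d.values.map (fun q => q.2)) (fun v => v) = some m := by
      rcases h : PySem.List.min? (d.values.map (fun q => q.2)) (fun v => v) with _ | m
      · rw [PySem.List.min?_eq_none_iff] at h; exact absurd h hys
      · exact ⟨m, h⟩
    obtain ⟨My, hMy⟩ : ∃ m, PySem.List.max? (d.values.map (fun q => q.2)) (fun v => v) = some m := by
      rcases h : PySem.List.max? (d.values.map (fun q => q.2)) (fun v => v) with _ | m
      · rw [PySem.List.max?_eq_none_iff] at h; exact absurd h hys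
      · exact ⟨m, h⟩
    have hb : bounds_py d = (mx, Mx, my0, My) := by
      simp only [bounds_py]
      rw [if_neg hxs, if_neg hys, hmx, hMx, hmy, hMy]
      rfl
    have hmem : ∀ p ∈ d.items, mx ≤ p.2.1 ∧ p.2.1 ≤ Mx ∧ my0 ≤ p.2.2 ∧ p.2.2 ≤ My := by
      intro p hp
      have h1 : p.2.1 ∈ d.values.map (fun q => q.1) := by
        simp only [PySem.Dict.values, List.map_map, List.mem_map]
        exact ⟨p, hp, rfl⟩
      have h2 : p.2.2 ∈ d.values.map (fun q => q.2) := by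
        simp only [PySem.Dict.values, List.map_map, List.mem_map]
        exact ⟨p, hp, rfl⟩
      exact ⟨PySem.List.min?_isMin hmx _ h1, PySem.List.max?_isMax hMx _ h1,
             PySem.List.min?_isMin hmy _ h2, PySem.List.max?_isMax hMy _ h2⟩
    obtain ⟨p0, hp0⟩ := List.exists_mem_of_ne_nil d.items hne
    obtain ⟨e1, e2, e3, e4⟩ := hmem p0 hp0
    -- kept: B reads the sorted keys straight off the sorted items
    have hkept : (PySem.List.sorted d.items (fun p => p.1) false).map (fun p => p.1)
        = PySem.List.sorted d.keys (fun s => s) false := by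
      apply pv_map_fst_sorted
      · exact hsperm.map _
      · exact PySem.List.sorted_pairwise d.items (fun p => p.1)
    show ((PySem.List.pyRange (bounds_py d).2.2.2 ((bounds_py d).2.2.1 - 1) (-1)).foldl (fun g y =>
        g ++ [(PySem.List.pyRange (bounds_py d).1 ((bounds_py d).2.1 + 1) 1).foldl (fun row x =>
          row ++ [if (PySem.Dict.mk ((d.items.foldl (fun c p => c.modify p.2 [] (fun t => t ++ [p.1])) PySem.Dict.empty).items.map (fun p => (p.1, PySem.List.sorted p.2 (fun s => s) false)))).getD (x, y) [] = [] then "_"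
                  else PySem.Str.join "/" ((PySem.Dict.mk ((d.items.foldl (fun c p => c.modify p.2 [] (fun t => t ++ [p.1])) PySem.Dict.empty).items.map (fun p => (p.1, PySem.List.sorted p.2 (fun s => s) false)))).getD (x, y) [])]) []]) [],
        PySem.List.sorted d.keys (fun s => s) false)
      = (((PySem.List.sorted d.items (fun p => p.1) false).foldl (pvScatterStep ((PySem.List.max? ((PySem.List.sorted d.items (fun p => p.1) false).map (fun p => p.2.2)) (fun v => v)).getD 0) ((PySem.List.min? ((PySem.List.sorted d.items (fun p => p.1) false).map (fun p => p.2.1)) (fun v => v)).getD 0))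
          ((PySem.List.pyRange 0 ((PySem.List.max? ((PySem.List.sorted d.items (fun p => p.1) false).map (fun p => p.2.2)) (fun v => v)).getD 0 - (PySem.List.min? ((PySem.List.sorted d.items (fun p => p.1) false).map (fun p => p.2.2)) (fun v => v)).getD 0 + 1) 1).map (fun _ =>
            (PySem.List.pyRange 0 ((PySem.List.max? ((PySem.List.sorted d.items (fun p => p.1) false).map (fun p => p.2.1)) (fun v => v)).getD 0 - (PySem.List.min? ((PySem.List.sorted d.items (fun p => p.1) false).map (fun p => p.2.1)) (fun v => v)).getD 0 + 1) 1).map (fun _ => (none : Option String))))).map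
          (fun row => row.map (fun t => t.getD "_")),
        (PySem.List.sorted d.items (fun p => p.1) false).map (fun p => p.1))
    rw [Prod.mk.injEq]
    refine ⟨?_, hkept.symm⟩
    have hb1 : (bounds_py d).1 = mx := by rw [hb]
    have hb2 : (bounds_py d).2.1 = Mx := by rw [hb]
    have hb3 : (bounds_py d).2.2.1 = my0 := by rw [hb]
    have hb4 : (bounds_py d).2.2.2 = My := by rw [hb]
    rw [hb1, hb2, hb3, hb4,
      pv_min_perm _ _ hxperm, pv_max_perm _ _ hxperm, pv_min_perm _ _ hyperm, pv_max_perm _ _ hyperm,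
      hmx, hMx, hmy, hMy]
    simp only [Option.getD_some]
    exact pv_grid d.items mx Mx my0 My
      (fun p hp => ⟨(hmem p hp).1, (hmem p hp).2.1⟩)
      (fun p hp => ⟨(hmem p hp).2.2.1, (hmem p hp).2.2.2⟩)
      (e1.trans e2) (e3.trans e4)

-- ===== VERDICT (by name: the statement is the Claim_ definition above) =====
theorem build_token_grid_py_spec : Claim_equal_build_token_grid_py := by
  intro coords keep _
  unfold Spec_build_token_grid_py build_token_grid_py build_token_grid_py_alt
  cases keep with
  | none => exact pv_main (PySem.Dict.ofList coords)
  | some ks => exact pv_main _
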